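-- pv_equiv track=rewrite | github.com/Khadichakhon/AI-hackathon | solver.py | find_tip
-- ===== SOURCE A (Python) =====
-- def find_tip(pixels, shape):
--     """Find tip of an object (pixel with fewest neighbors)"""
--     h, w = shape
--     min_neighbors = float('inf')
--     tip_pos = None
--
--     pixel_set = set((p[0], p[1]) for p in pixels)
--
--     for r, c in pixels:
--         neighbors = 0
--         for dr, dc in [(0, 1), (0, -1), (1, 0), (-1, 0)]:
--             nr, nc = r + dr, c + dc
--             if (nr, nc) in pixel_set:
--                 neighbors += 1
--
--         if neighbors < min_neighbors:
--             min_neighbors = neighbors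
--             tip_pos = (r, c)
--
--     return tip_pos if min_neighbors <= 2 else None
-- ===== SOURCE B (Python) =====
-- def find_tip(pixels, shape):
--     """Find tip of an object (pixel with fewest neighbors)"""
--     pixel_set = set((p[0], p[1]) for p in pixels)
--
--     # scatter: counter[p] = number of present orthogonal neighbors of p
--     counter = {}
--     for r, c in pixel_set:
--         for dr, dc in ((0, 1), (0, -1), (1, 0), (-1, 0)):
--             key = (r + dr, c + dc)
--             counter[key] = counter.get(key, 0) + 1
--
--     best_pos = None
--     best_deg = None
--     for r, c in pixels:
--         deg = counter.get((r, c), 0)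
--         if best_deg is None or deg < best_deg:
--             best_deg = deg
--             best_pos = (r, c)
--
--     if best_pos is not None and best_deg <= 2:
--         return best_pos
--     return None
-- ===== Notes on version B (the rewrite author's own statement) =====
-- stated objective: alternative
-- what changed: Instead of gathering each pixel's degree by four set-membership tests inside the selection loop, B scatters +1 increments from every deduped pixel to its four orthogonal neighbours into a counter dict once, then selects the first strict-minimum pixel by plain dict lookup.
import Mathlib
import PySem

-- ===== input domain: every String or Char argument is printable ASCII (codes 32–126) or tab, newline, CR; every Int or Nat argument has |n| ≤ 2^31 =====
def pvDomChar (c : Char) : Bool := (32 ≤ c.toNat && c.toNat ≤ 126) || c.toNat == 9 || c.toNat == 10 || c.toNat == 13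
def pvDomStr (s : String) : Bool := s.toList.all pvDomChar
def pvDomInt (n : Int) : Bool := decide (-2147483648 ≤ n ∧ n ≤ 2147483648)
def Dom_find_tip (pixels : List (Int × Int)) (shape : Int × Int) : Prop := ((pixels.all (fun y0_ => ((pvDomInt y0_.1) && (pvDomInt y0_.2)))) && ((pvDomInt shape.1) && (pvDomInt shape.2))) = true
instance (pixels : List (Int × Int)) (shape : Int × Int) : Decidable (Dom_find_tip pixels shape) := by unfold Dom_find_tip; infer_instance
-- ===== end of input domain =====

-- B scatters +1 from every deduped pixel to its four orthogonal neighbours into a counter dict and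
-- then picks the first strict-minimum pixel by lookup, instead of A's four membership tests per pixel.


def pvOffsets : List (Int × Int) := [(0, 1), (0, -1), (1, 0), (-1, 0)]

-- ===== PORT A =====
def find_tip (pixels : List (Int × Int)) (_shape : Int × Int) : Option (Int × Int) :=
  let pixel_set : PySem.Set (Int × Int) := PySem.Set.ofList (pixels.map (fun p => (p.1, p.2)))
  let st := pixels.foldl (fun (st : Option Int × Option (Int × Int)) p =>
      let neighbors : Int := pvOffsets.foldl (fun n off =>
        if PySem.Set.contains pixel_set (p.1 + off.1, p.2 + off.2) then n + 1 else n) 0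
      match st.1 with
      | none => (some neighbors, some p)             -- neighbors < inf
      | some m => if neighbors < m then (some neighbors, some p) else st)
    (none, none)
  match st.1 with
  | some m => if m ≤ 2 then st.2 else none
  | none => none                                     -- inf <= 2 is false, tip_pos is None anyway

-- ===== PORT B =====
def find_tip_alt (pixels : List (Int × Int)) (_shape : Int × Int) : Option (Int × Int) :=
  let pixel_set : PySem.Set (Int × Int) := PySem.Set.ofList (pixels.map (fun p => (p.1, p.2)))
  -- the counter dict is only looked up afterwards, so iterating the Set's element list is order-safe
  let counter : PySem.Dict (Int × Int) Int :=
    pixel_set.foldl (fun d q =>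
      pvOffsets.foldl (fun d off =>
        d.insert (q.1 + off.1, q.2 + off.2) ((d.getD (q.1 + off.1, q.2 + off.2) 0) + 1)) d)
      PySem.Dict.empty
  let st := pixels.foldl (fun (st : Option (Int × Int) × Option Int) p =>
      let deg := counter.getD (p.1, p.2) 0
      match st.2 with
      | none => (some (p.1, p.2), some deg)
      | some bd => if deg < bd then (some (p.1, p.2), some deg) else st)
    (none, none)
  match st with
  | (some b, some bd) => if bd ≤ 2 then some b else none
  | _ => none

-- ===== PRECONDITION & SPEC =====
def Spec_find_tip (pixels : List (Int × Int)) (shape : Int × Int) (out : Option (Int × Int)) : Prop := out = find_tip_alt pixels shape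
instance (pixels : List (Int × Int)) (shape : Int × Int) (out : Option (Int × Int)) : Decidable (Spec_find_tip pixels shape out) := by unfold Spec_find_tip; infer_instance

-- ===== CLAIM (what is proved, stated in full; the proofs are below) =====
def Claim_equal_find_tip : Prop := ∀ (pixels : List (Int × Int)) (shape : Int × Int), Dom_find_tip pixels shape → Spec_find_tip pixels shape (find_tip pixels shape)

-- ===== LEMMAS AND PROOFS =====

-- contribution of one scattering source q at target p
def pvHit (q p : Int × Int) : Int :=
  (if q = (p.1, p.2 - 1) then 1 else 0) + (if q = (p.1, p.2 + 1) then 1 else 0) +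
  (if q = (p.1 - 1, p.2) then 1 else 0) + (if q = (p.1 + 1, p.2) then 1 else 0)

lemma inner_getD (q : Int × Int) (d : PySem.Dict (Int × Int) Int) (p : Int × Int) :
    (pvOffsets.foldl (fun d off =>
        d.insert (q.1 + off.1, q.2 + off.2) ((d.getD (q.1 + off.1, q.2 + off.2) 0) + 1)) d).getD p 0
    = d.getD p 0 + pvHit q p := by
  have h : (pvOffsets.foldl (fun d off =>
        d.insert (q.1 + off.1, q.2 + off.2) ((d.getD (q.1 + off.1, q.2 + off.2) 0) + 1)) d)
      = (pvOffsets.map (fun off => (q.1 + off.1, q.2 + off.2))).foldl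
          (fun d k => d.insert k (d.getD k 0 + 1)) d := by
    rw [List.foldl_map]
  rw [h, PySem.Dict.getD_foldl_insert_add_one]
  have hc : ((pvOffsets.map (fun off => (q.1 + off.1, q.2 + off.2))).count p : Int) = pvHit q p := by
    simp [pvOffsets, List.count_cons, pvHit, Prod.ext_iff]
    split_ifs <;> omega
  omega

lemma outer_getD (l : List (Int × Int)) (d : PySem.Dict (Int × Int) Int) (p : Int × Int) :
    (l.foldl (fun d q =>
      pvOffsets.foldl (fun d off =>
        d.insert (q.1 + off.1, q.2 + off.2) ((d.getD (q.1 + off.1, q.2 + off.2) 0) + 1)) d) d).getD p 0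
    = d.getD p 0 + (l.map (fun q => pvHit q p)).sum := by
  induction l generalizing d with
  | nil => simp
  | cons q l ih => simp [List.foldl_cons, ih, inner_getD]; ring

lemma sum_ind (l : List (Int × Int)) (hl : l.Nodup) (x : Int × Int) :
    (l.map (fun q => if q = x then (1:Int) else 0)).sum = if x ∈ l then 1 else 0 := by
  induction l with
  | nil => simp
  | cons a l ih =>
    simp only [List.map_cons, List.sum_cons, List.mem_cons, List.nodup_cons] at *
    rcases hl with ⟨ha, hl⟩
    rw [ih hl]
    by_cases hax : a = x
    · subst hax; simp [ha]
    · simp [hax, Ne.symm hax]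

lemma sum_hit_of_nodup (l : List (Int × Int)) (hl : l.Nodup) (p : Int × Int) :
    (l.map (fun q => pvHit q p)).sum =
      (if (p.1, p.2 - 1) ∈ l then (1:Int) else 0) + (if (p.1, p.2 + 1) ∈ l then 1 else 0) +
      (if (p.1 - 1, p.2) ∈ l then 1 else 0) + (if (p.1 + 1, p.2) ∈ l then 1 else 0) := by
  have e : (l.map (fun q => pvHit q p)).sum
      = (l.map (fun q => if q = (p.1, p.2 - 1) then (1:Int) else 0)).sum
      + (l.map (fun q => if q = (p.1, p.2 + 1) then (1:Int) else 0)).sum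
      + (l.map (fun q => if q = (p.1 - 1, p.2) then (1:Int) else 0)).sum
      + (l.map (fun q => if q = (p.1 + 1, p.2) then (1:Int) else 0)).sum := by
    simp only [pvHit]
    rw [← PySem.List.sum_map_add_int, ← PySem.List.sum_map_add_int, ← PySem.List.sum_map_add_int]
  rw [e, sum_ind l hl, sum_ind l hl, sum_ind l hl, sum_ind l hl]

-- A's gathered neighbour count equals B's scattered counter value, per pixel
lemma deg_eq (pixels : List (Int × Int)) (p : Int × Int) :
    ((PySem.Set.ofList (pixels.map (fun p => (p.1, p.2)))).foldl (fun d q =>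
      pvOffsets.foldl (fun d off =>
        d.insert (q.1 + off.1, q.2 + off.2) ((d.getD (q.1 + off.1, q.2 + off.2) 0) + 1)) d)
      (PySem.Dict.empty : PySem.Dict (Int × Int) Int)).getD (p.1, p.2) 0
    = pvOffsets.foldl (fun n off =>
        if PySem.Set.contains (PySem.Set.ofList (pixels.map (fun p => (p.1, p.2)))) (p.1 + off.1, p.2 + off.2) then n + 1 else n) 0 := by
  rw [outer_getD]
  rw [sum_hit_of_nodup _ (PySem.Set.nodup_ofList _)]
  simp [pvOffsets, PySem.Set.mem_ofList, sub_eq_add_neg]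
  split_ifs <;> omega

-- the two selection folds carry the same state, with components swapped
lemma sel_swap (f g : (Int × Int) → Int) (l : List (Int × Int))
    (h : ∀ p ∈ l, f p = g p) (m : Option Int) (t : Option (Int × Int)) :
    l.foldl (fun (st : Option (Int × Int) × Option Int) p =>
      match st.2 with
      | none => (some (p.1, p.2), some (g p))
      | some bd => if g p < bd then (some (p.1, p.2), some (g p)) else st) (t, m)
    = ((l.foldl (fun (st : Option Int × Option (Int × Int)) p =>
      match st.1 with
      | none => (some (f p), some p)
      | some m => if f p < m then (some (f p), some p) else st) (m, t)).2,
       (l.foldl (fun (st : Option Int × Option (Int × Int)) p =>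
      match st.1 with
      | none => (some (f p), some p)
      | some m => if f p < m then (some (f p), some p) else st) (m, t)).1) := by
  induction l generalizing m t with
  | nil => simp
  | cons p l ih =>
    have hp : f p = g p := h p (by simp)
    simp only [List.foldl_cons]
    cases m with
    | none => simpa [hp] using ih (fun q hq => h q (by simp [hq])) (some (f p)) (some p)
    | some bd =>
      rw [← hp]
      by_cases hlt : f p < bd
      · simpa [hlt] using ih (fun q hq => h q (by simp [hq])) (some (f p)) (some p)
      · simpa [hlt] using ih (fun q hq => h q (by simp [hq])) (some bd) t

-- ===== VERDICT (by name: the statement is the Claim_ definition above) =====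
theorem find_tip_spec : Claim_equal_find_tip := by
  intro pixels shape _
  simp only [Spec_find_tip, find_tip, find_tip_alt]
  rw [sel_swap
    (f := fun p => pvOffsets.foldl (fun n off =>
      if PySem.Set.contains (PySem.Set.ofList (pixels.map (fun p => (p.1, p.2)))) (p.1 + off.1, p.2 + off.2) then n + 1 else n) 0)
    (g := fun p => ((PySem.Set.ofList (pixels.map (fun p => (p.1, p.2)))).foldl (fun d q =>
      pvOffsets.foldl (fun d off =>
        d.insert (q.1 + off.1, q.2 + off.2) ((d.getD (q.1 + off.1, q.2 + off.2) 0) + 1)) d)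
      (PySem.Dict.empty : PySem.Dict (Int × Int) Int)).getD (p.1, p.2) 0)
    (h := fun p _ => (deg_eq pixels p).symm)]
  cases hst : pixels.foldl (fun (st : Option Int × Option (Int × Int)) p =>
      match st.1 with
      | none => (some (pvOffsets.foldl (fun n off =>
          if PySem.Set.contains (PySem.Set.ofList (pixels.map (fun p => (p.1, p.2)))) (p.1 + off.1, p.2 + off.2) then n + 1 else n) 0), some p)
      | some m => if (pvOffsets.foldl (fun n off =>
          if PySem.Set.contains (PySem.Set.ofList (pixels.map (fun p => (p.1, p.2)))) (p.1 + off.1, p.2 + off.2) then n + 1 else n) 0) < m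
          then (some (pvOffsets.foldl (fun n off =>
          if PySem.Set.contains (PySem.Set.ofList (pixels.map (fun p => (p.1, p.2)))) (p.1 + off.1, p.2 + off.2) then n + 1 else n) 0), some p) else st)
      (none, none) with
  | mk m t => cases m <;> cases t <;> simp
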